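-- pv_equiv track=rewrite | github.com/ZergD/Metarch | run.py | mytest
-- ===== SOURCE A (Python) =====
-- def mytest(argv):
--     prev = None
--     for word in argv:
--         for letter in word:
--             if prev == "-" and letter == "h":
--                 return True
--             prev = letter
--     return False
-- ===== SOURCE B (Python) =====
-- def mytest(argv):
--     return "-h" in "".join(argv)
-- ===== Notes on version B (the rewrite author's own statement) =====
-- stated objective: idiomatic
-- what changed: Replaces the character-by-character state machine tracking the previous character across word boundaries with building the joined string once and a single built-in substring search for '-h'.
import Mathlib
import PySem

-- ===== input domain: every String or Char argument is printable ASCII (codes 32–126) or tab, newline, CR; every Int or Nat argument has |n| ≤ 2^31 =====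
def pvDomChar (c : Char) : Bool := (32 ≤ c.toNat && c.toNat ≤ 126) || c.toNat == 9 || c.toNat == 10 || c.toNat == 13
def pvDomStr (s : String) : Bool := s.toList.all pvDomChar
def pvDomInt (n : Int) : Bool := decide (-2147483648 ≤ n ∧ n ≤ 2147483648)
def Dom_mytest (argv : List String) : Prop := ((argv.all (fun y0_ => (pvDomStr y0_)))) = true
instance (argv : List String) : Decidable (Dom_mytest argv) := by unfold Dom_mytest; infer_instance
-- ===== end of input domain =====

-- B replaces A's character state machine by join-then-substring-search; objective: idiomatic.

-- ===== PORT A =====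
-- inner 'for letter in word' loop: returns (found, final prev); early return = first component true
def mytestChars : Option Char → List Char → Bool × Option Char
  | prev, [] => (false, prev)
  | prev, c :: cs => if prev = some '-' ∧ c = 'h' then (true, prev) else mytestChars (some c) cs

-- outer 'for word in argv' loop, threading prev across words
def mytestWords : Option Char → List String → Bool
  | _, [] => false
  | prev, w :: ws =>
    match mytestChars prev w.toList with
    | (true, _) => true
    | (false, p) => mytestWords p ws

def mytest (argv : List String) : Bool := mytestWords none argv

-- ===== PORT B =====
def mytest_alt (argv : List String) : Bool := PySem.Str.isIn "-h" (PySem.Str.join "" argv)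

-- ===== PRECONDITION & SPEC =====
def Spec_mytest (argv : List String) (out : Bool) : Prop := out = mytest_alt argv
instance (argv : List String) (out : Bool) : Decidable (Spec_mytest argv out) := by unfold Spec_mytest; infer_instance

-- ===== CLAIM (what is proved, stated in full; the proofs are below) =====
def Claim_equal_mytest : Prop := ∀ (argv : List String), Dom_mytest argv → Spec_mytest argv (mytest argv)

-- ===== LEMMAS AND PROOFS =====

-- the state machine, unthreaded: one scan over a single char list, no early-return plumbing
def pvScan : Option Char → List Char → Bool
  | _, [] => false
  | prev, c :: cs => (decide (prev = some '-' ∧ c = 'h')) || pvScan (some c) cs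

theorem mytestChars_scan (cs : List Char) (prev : Option Char) (rest : List Char) :
    pvScan prev (cs ++ rest)
      = ((mytestChars prev cs).1 || pvScan (mytestChars prev cs).2 rest) := by
  induction cs generalizing prev with
  | nil => simp [mytestChars]
  | cons c cs ih =>
    by_cases h : prev = some '-' ∧ c = 'h'
    · simp [pvScan, mytestChars, h]
    · simp [pvScan, mytestChars, h, ih]

theorem mytestWords_scan (ws : List String) (prev : Option Char) :
    mytestWords prev ws = pvScan prev (ws.map String.toList).flatten := by
  induction ws generalizing prev with
  | nil => simp [mytestWords, pvScan]
  | cons w ws ih =>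
    have h := mytestChars_scan w.toList prev (ws.map String.toList).flatten
    rcases hc : mytestChars prev w.toList with ⟨found, p⟩
    cases found <;> simp_all [mytestWords]

theorem singleton_prefix_iff (c : Char) (cs : List Char) :
    [c] <+: cs ↔ cs.head? = some c := by
  cases cs with
  | nil => simp
  | cons d ds => simp [List.cons_prefix_cons, eq_comm]

theorem pvScan_iff (cs : List Char) (prev : Option Char) :
    pvScan prev cs = true ↔
      ((prev = some '-' ∧ cs.head? = some 'h') ∨ ['-', 'h'] <:+: cs) := by
  induction cs generalizing prev with
  | nil => simp [pvScan]
  | cons c cs ih =>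
    simp only [pvScan, Bool.or_eq_true, decide_eq_true_eq, ih, List.head?_cons]
    constructor
    · rintro (⟨h1, h2⟩ | ⟨h1, h2⟩ | h)
      · exact Or.inl ⟨h1, by simp [h2]⟩
      · refine Or.inr ?_
        refine List.infix_cons_iff.mpr (Or.inl ?_)
        obtain rfl : c = '-' := by injection h1
        exact List.cons_prefix_cons.mpr ⟨rfl, (singleton_prefix_iff _ _).mpr h2⟩
      · exact Or.inr (List.infix_cons_iff.mpr (Or.inr h))
    · rintro (⟨h1, h2⟩ | h)
      · exact Or.inl ⟨h1, by simpa using h2⟩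
      · rcases List.infix_cons_iff.mp h with h | h
        · rcases List.cons_prefix_cons.mp h with ⟨h1, h2⟩
          exact Or.inr (Or.inl ⟨by rw [h1], (singleton_prefix_iff _ _).mp h2⟩)
        · exact Or.inr (Or.inr h)

theorem intercalate_nil_eq (l : List (List Char)) : [].intercalate l = l.flatten := by
  induction l with
  | nil => rfl
  | cons c cs ih =>
    cases cs with
    | nil => simp [List.intercalate]
    | cons d ds => simp_all [List.intercalate, List.intersperse]

-- ===== VERDICT (by name: the statement is the Claim_ definition above) =====
theorem mytest_spec : Claim_equal_mytest := by
  intro argv _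
  show mytest argv = mytest_alt argv
  rw [Bool.eq_iff_iff]
  rw [mytest_alt, PySem.Str.isIn_iff_infix]
  have hj : (PySem.Str.join "" argv).toList = (argv.map String.toList).flatten := by
    simp [PySem.Chars.join, intercalate_nil_eq]
  rw [hj, mytest, mytestWords_scan, pvScan_iff]
  simp
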